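-- pv_equiv track=rewrite | github.com/MU-Software/projectCo | src/util/pmmod_util.py | calculate_pmmod
-- ===== SOURCE A (Python) =====
-- import typing
--
-- def validate_pmmod_element(z: typing.Sequence[int]) -> bool:
--     return (
--         not isinstance(z, (str, bytes))
--         and isinstance(z, typing.Sequence)
--         and all(isinstance(x, int) for x in z)
--         and len(z) == 3
--     )
--
-- def calculate_pmmod(pmmod: typing.Sequence[typing.Sequence[int]]) -> int:
--     if not pmmod:
--         raise ValueError("Argument 'pmmod' is empty")
--
--     if not all(map(validate_pmmod_element, pmmod)):
--         raise ValueError("Length of one of argument 'pmmod' elements is not 3")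
--
--     result: str = ""
--     for pmmod_element in pmmod:
--         result += str(int("".join(map(lambda z: str(int(bool(z))), pmmod_element)), 2))
--
--     return int(result)
-- ===== SOURCE B (Python) =====
-- import typing
--
--
-- def validate_pmmod_element(z: typing.Sequence[int]) -> bool:
--     return (
--         not isinstance(z, (str, bytes))
--         and isinstance(z, typing.Sequence)
--         and all(isinstance(x, int) for x in z)
--         and len(z) == 3
--     )
--
--
-- def calculate_pmmod(pmmod: typing.Sequence[typing.Sequence[int]]) -> int:
--     if not pmmod:
--         raise ValueError("Argument 'pmmod' is empty")
--
--     if not all(map(validate_pmmod_element, pmmod)):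
--         raise ValueError("Length of one of argument 'pmmod' elements is not 3")
--
--     result = 0
--     for z0, z1, z2 in pmmod:
--         result = result * 10 + 4 * bool(z0) + 2 * bool(z1) + bool(z2)
--     return result
-- ===== Notes on version B (the rewrite author's own statement) =====
-- stated objective: simpler
-- what changed: Replaces the string pipeline (per-triple bit-string join, base-2 parse, str(), concatenation, final base-10 parse) with a single integer Horner accumulation result = result*10 + (4*bool(z0)+2*bool(z1)+bool(z2)); no strings are built or parsed.
import Mathlib
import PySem

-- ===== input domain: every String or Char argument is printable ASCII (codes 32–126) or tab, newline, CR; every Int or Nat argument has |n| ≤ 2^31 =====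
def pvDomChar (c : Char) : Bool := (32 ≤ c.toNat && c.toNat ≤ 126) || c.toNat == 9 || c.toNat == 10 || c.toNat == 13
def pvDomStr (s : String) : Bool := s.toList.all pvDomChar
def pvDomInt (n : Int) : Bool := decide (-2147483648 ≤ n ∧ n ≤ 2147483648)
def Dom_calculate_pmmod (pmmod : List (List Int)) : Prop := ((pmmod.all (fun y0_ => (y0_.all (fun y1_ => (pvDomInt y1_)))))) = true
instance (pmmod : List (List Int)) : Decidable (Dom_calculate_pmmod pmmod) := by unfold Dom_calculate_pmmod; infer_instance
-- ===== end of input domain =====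

-- B replaces A's string pipeline (bit-string join, base-2 parse, str(), concatenation, final
-- base-10 parse) with a single integer Horner accumulation: simpler, no strings built or parsed.


-- ===== PORT A =====
-- str(int(bool(z)))
def pvBitChars (z : Int) : List Char := PySem.Int.toChars (if z == 0 then 0 else 1)
-- int(s, 2), ported by hand: exact for nonempty strings of '0'/'1' digits, which is the only
-- kind of string A ever passes to it (each element validated to length 3)
def pvBinVal (cs : List Char) : Int := cs.foldl (fun a c => 2 * a + ((c.toNat : Int) - 48)) 0
-- int(s), ported by hand: exact for nonempty strings of decimal digits, which is the only kind
-- of string A ever passes to it (one digit per validated element, pmmod nonempty)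
def pvDecVal (cs : List Char) : Int := cs.foldl (fun a c => 10 * a + ((c.toNat : Int) - 48)) 0

def calculate_pmmod (pmmod : List (List Int)) : Int :=
  if pmmod = [] then 0        -- Python raises ValueError here; excluded by Pre_
  else if ¬ (pmmod.all (fun z => z.length == 3)) then 0
    -- validate_pmmod_element: the isinstance checks always hold under the type convention,
    -- only len(z) == 3 is material; Python raises ValueError here, excluded by Pre_
  else
    pvDecVal (pmmod.foldl
      (fun (res : List Char) el =>
        res ++ PySem.Int.toChars (pvBinVal ((el.map pvBitChars).flatten))) [])

-- ===== PORT B =====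
def calculate_pmmod_alt (pmmod : List (List Int)) : Int :=
  if pmmod = [] then 0        -- Python raises ValueError here; excluded by Pre_
  else if ¬ (pmmod.all (fun z => z.length == 3)) then 0   -- Python raises ValueError; excluded by Pre_
  else
    pmmod.foldl
      (fun r t =>
        match t with
        | [z0, z1, z2] =>
            r * 10 + 4 * (if z0 == 0 then 0 else 1) + 2 * (if z1 == 0 then 0 else 1)
              + (if z2 == 0 then 0 else 1)
        | _ => r)   -- unreachable: every element was validated to length 3
      0

-- ===== PRECONDITION & SPEC =====
-- Pre_ excludes exactly the inputs on which A raises ValueError: the empty list and lists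
-- containing an element whose length is not 3.
def Pre_calculate_pmmod (pmmod : List (List Int)) : Prop :=
  pmmod ≠ [] ∧ ∀ t ∈ pmmod, t.length = 3
instance (pmmod : List (List Int)) : Decidable (Pre_calculate_pmmod pmmod) := by
  unfold Pre_calculate_pmmod; infer_instance
def pvWitness_calculate_pmmod : List (List Int) := [[0, 1, 0], [1, 0, 1]]

def Spec_calculate_pmmod (pmmod : List (List Int)) (out : Int) : Prop := out = calculate_pmmod_alt pmmod
instance (pmmod : List (List Int)) (out : Int) : Decidable (Spec_calculate_pmmod pmmod out) := by unfold Spec_calculate_pmmod; infer_instance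

-- ===== CLAIM (what is proved, stated in full; the proofs are below) =====
def Claim_equal_calculate_pmmod : Prop := ∀ (pmmod : List (List Int)), Dom_calculate_pmmod pmmod → Pre_calculate_pmmod pmmod → Spec_calculate_pmmod pmmod (calculate_pmmod pmmod)

-- ===== LEMMAS AND PROOFS =====

theorem pvDecVal_append_singleton (cs : List Char) (d : Char) :
    pvDecVal (cs ++ [d]) = 10 * pvDecVal cs + ((d.toNat : Int) - 48) := by
  simp [pvDecVal, List.foldl_append]

-- one loop step of A's string build parses to one Horner step of B
theorem pvStep (cs : List Char) (a b c : Int) :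
    pvDecVal (cs ++ PySem.Int.toChars (pvBinVal (([a, b, c].map pvBitChars).flatten)))
      = pvDecVal cs * 10 + 4 * (if a == 0 then 0 else 1) + 2 * (if b == 0 then 0 else 1)
          + (if c == 0 then 0 else 1) := by
  by_cases ha : a = 0 <;> by_cases hb : b = 0 <;> by_cases hc : c = 0 <;>
    simp only [List.map, List.flatten, pvBitChars, ha, hb, hc, beq_self_eq_true, if_true,
      beq_iff_eq] <;>
    norm_num [
      show (PySem.Int.toChars (pvBinVal (PySem.Int.toChars 0 ++ (PySem.Int.toChars 0 ++ PySem.Int.toChars 0)))) = ['0'] from by decide,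
      show (PySem.Int.toChars (pvBinVal (PySem.Int.toChars 0 ++ (PySem.Int.toChars 0 ++ PySem.Int.toChars 1)))) = ['1'] from by decide,
      show (PySem.Int.toChars (pvBinVal (PySem.Int.toChars 0 ++ (PySem.Int.toChars 1 ++ PySem.Int.toChars 0)))) = ['2'] from by decide,
      show (PySem.Int.toChars (pvBinVal (PySem.Int.toChars 0 ++ (PySem.Int.toChars 1 ++ PySem.Int.toChars 1)))) = ['3'] from by decide,
      show (PySem.Int.toChars (pvBinVal (PySem.Int.toChars 1 ++ (PySem.Int.toChars 0 ++ PySem.Int.toChars 0)))) = ['4'] from by decide,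
      show (PySem.Int.toChars (pvBinVal (PySem.Int.toChars 1 ++ (PySem.Int.toChars 0 ++ PySem.Int.toChars 1)))) = ['5'] from by decide,
      show (PySem.Int.toChars (pvBinVal (PySem.Int.toChars 1 ++ (PySem.Int.toChars 1 ++ PySem.Int.toChars 0)))) = ['6'] from by decide,
      show (PySem.Int.toChars (pvBinVal (PySem.Int.toChars 1 ++ (PySem.Int.toChars 1 ++ PySem.Int.toChars 1)))) = ['7'] from by decide,
      show (('0'.toNat : Int)) = 48 from rfl,
      show (('1'.toNat : Int)) = 49 from rfl,
      show (('2'.toNat : Int)) = 50 from rfl,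
      show (('3'.toNat : Int)) = 51 from rfl,
      show (('4'.toNat : Int)) = 52 from rfl,
      show (('5'.toNat : Int)) = 53 from rfl,
      show (('6'.toNat : Int)) = 54 from rfl,
      show (('7'.toNat : Int)) = 55 from rfl,
      pvDecVal_append_singleton] <;> ring

theorem pvBuild_eq (l : List (List Int)) (h : ∀ t ∈ l, t.length = 3) (cs : List Char) :
    pvDecVal (l.foldl
        (fun (res : List Char) el =>
          res ++ PySem.Int.toChars (pvBinVal ((el.map pvBitChars).flatten))) cs)
      = l.foldl
          (fun r t =>
            match t with
            | [z0, z1, z2] =>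
                r * 10 + 4 * (if z0 == 0 then 0 else 1) + 2 * (if z1 == 0 then 0 else 1)
                  + (if z2 == 0 then 0 else 1)
            | _ => r)
          (pvDecVal cs) := by
  induction l generalizing cs with
  | nil => rfl
  | cons t l ih =>
    have ht : t.length = 3 := h t (List.mem_cons_self ..)
    match t, ht with
    | [a, b, c], _ =>
      simp only [List.foldl_cons]
      rw [ih (fun t ht' => h t (List.mem_cons_of_mem _ ht')), pvStep]

-- ===== VERDICT (by name: the statement is the Claim_ definition above) =====
theorem calculate_pmmod_spec : Claim_equal_calculate_pmmod := by
  intro pmmod _ hpre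
  obtain ⟨hne, hlen⟩ := hpre
  unfold Spec_calculate_pmmod calculate_pmmod calculate_pmmod_alt
  have hall : pmmod.all (fun z => z.length == 3) = true := by
    simp only [List.all_eq_true, beq_iff_eq]; exact hlen
  rw [if_neg hne, if_neg hne, if_neg (by simp [hall]), if_neg (by simp [hall])]
  simpa using pvBuild_eq pmmod hlen []
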